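-- pv_equiv track=rewrite | github.com/aga-siwek/python_boring_stuff | ch05_dictionaries_and_structuring_data/task_chess_dictionary_validator.py | available_figure_list_check
-- ===== SOURCE A (Python) =====
-- def available_figure_list_check(chess_board):
--     available_figure_list = ["wqueen", "wking", "wpaw", "wbishop", "wknight", "wrock","bqueen", "bking", "bpaw", "bbishop", "bknight", "brock"]
--     figures_all = 0
--     available_figures = 0
--
--     for index, iteam in enumerate(available_figure_list):
--         for v in chess_board.values():
--             if v == iteam:
--                 available_figures += 1
--
--
--     for v in chess_board.values():
--         if v != " " :
--             figures_all += 1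
--
--     if available_figures == figures_all:
--         return True
--     return False
-- ===== SOURCE B (Python) =====
-- VALID_FIGURES = {"wqueen", "wking", "wpaw", "wbishop", "wknight", "wrock",
--                  "bqueen", "bking", "bpaw", "bbishop", "bknight", "brock"}
--
--
-- def available_figure_list_check(chess_board):
--     return set(chess_board.values()) - {" "} <= VALID_FIGURES
-- ===== Notes on version B (the rewrite author's own statement) =====
-- stated objective: simpler
-- what changed: Replaces A's two counting passes (a 12-way nested scan tallying matches plus a non-blank tally compared for equality) by collapsing the board's values into a set, stripping the blank, and deciding with one subset test against the constant set of valid figures.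
import Mathlib
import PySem

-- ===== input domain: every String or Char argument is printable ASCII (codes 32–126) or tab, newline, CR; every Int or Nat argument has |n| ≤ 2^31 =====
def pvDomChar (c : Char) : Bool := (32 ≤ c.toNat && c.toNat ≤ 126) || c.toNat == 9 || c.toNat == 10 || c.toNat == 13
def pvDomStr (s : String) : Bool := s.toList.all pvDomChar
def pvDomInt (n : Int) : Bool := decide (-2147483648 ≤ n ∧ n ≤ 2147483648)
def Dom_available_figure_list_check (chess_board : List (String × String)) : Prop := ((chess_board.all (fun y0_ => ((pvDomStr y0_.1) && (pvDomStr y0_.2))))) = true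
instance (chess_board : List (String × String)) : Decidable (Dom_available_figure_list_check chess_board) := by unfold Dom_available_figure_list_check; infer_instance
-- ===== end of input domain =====

-- B replaces A's two counting passes with one subset test on the set of observed values (minus the blank); return value only, no mutation.

-- ===== PORT A =====
def available_figure_list_check (chess_board : List (String × String)) : Bool :=
  let available_figure_list : List String :=
    ["wqueen", "wking", "wpaw", "wbishop", "wknight", "wrock",
     "bqueen", "bking", "bpaw", "bbishop", "bknight", "brock"]
  let figures_all : Int := 0
  let available_figures : Int := 0
  let available_figures :=
    (PySem.List.enumerate available_figure_list).foldl
      (fun acc p =>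
        (chess_board.map (·.2)).foldl (fun a v => if v == p.2 then a + 1 else a) acc)
      available_figures
  let figures_all :=
    (chess_board.map (·.2)).foldl (fun a v => if v != " " then a + 1 else a) figures_all
  if available_figures == figures_all then true else false

-- ===== PORT B =====
def pvValidFigures : PySem.Set String :=
  PySem.Set.ofList ["wqueen", "wking", "wpaw", "wbishop", "wknight", "wrock",
                    "bqueen", "bking", "bpaw", "bbishop", "bknight", "brock"]

def available_figure_list_check_alt (chess_board : List (String × String)) : Bool :=
  PySem.Set.issubset
    (PySem.Set.diff (PySem.Set.ofList (chess_board.map (·.2))) (PySem.Set.ofList [" "]))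
    pvValidFigures

-- ===== PRECONDITION & SPEC =====
def Spec_available_figure_list_check (chess_board : List (String × String)) (out : Bool) : Prop := out = available_figure_list_check_alt chess_board
instance (chess_board : List (String × String)) (out : Bool) : Decidable (Spec_available_figure_list_check chess_board out) := by unfold Spec_available_figure_list_check; infer_instance

-- ===== CLAIM (what is proved, stated in full; the proofs are below) =====
def Claim_equal_available_figure_list_check : Prop := ∀ (chess_board : List (String × String)), Dom_available_figure_list_check chess_board → Spec_available_figure_list_check chess_board (available_figure_list_check chess_board)

-- ===== LEMMAS AND PROOFS =====

def pvFigs : List String :=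
  ["wqueen", "wking", "wpaw", "wbishop", "wknight", "wrock",
   "bqueen", "bking", "bpaw", "bbishop", "bknight", "brock"]

-- counting fold = accumulator + count
theorem pv_count_fold (item : String) (vs : List String) (a : Int) :
    vs.foldl (fun a v => if v == item then a + 1 else a) a = a + vs.count item := by
  induction vs generalizing a with
  | nil => simp
  | cons v vs ih =>
    rw [List.foldl_cons, List.count_cons]
    by_cases h : v = item
    · subst h
      have ht : (v == v) = true := beq_self_eq_true v
      rw [if_pos ht, ih, if_pos ht]
      push_cast; ring
    · have h1 : ¬ ((v == item) = true) := by simp [h]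
      rw [if_neg h1, ih]
      simp [h1]

-- non-blank counting fold = length of the filtered list
theorem pv_len_fold (vs : List String) (a : Int) :
    vs.foldl (fun a v => if v != " " then a + 1 else a) a
      = a + ((vs.filter (fun v => v != " ")).length : Int) := by
  induction vs generalizing a with
  | nil => simp
  | cons v vs ih =>
    simp only [List.foldl_cons, List.filter_cons, ih]
    by_cases h : v = " "
    · simp [h]
    · have hb : (v != " ") = true := by simpa using h
      simp [hb]; ring

theorem pv_sum_counts_cons (figs : List String) (v : String) (vs : List String) :
    (figs.map ((v :: vs).count ·)).sum = (figs.map (vs.count ·)).sum + figs.count v := by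
  induction figs with
  | nil => simp
  | cons f figs ih =>
    simp only [List.map_cons, List.sum_cons]
    have hh : (v :: vs).count f = vs.count f + if (v == f) = true then 1 else 0 := List.count_cons
    have hv : (f :: figs).count v = figs.count v + if (f == v) = true then 1 else 0 := List.count_cons
    rw [hh, hv, ih]
    by_cases h : v = f
    · subst h; simp; omega
    · have h1 : ¬ ((v == f) = true) := by simp [h]
      have h2 : ¬ ((f == v) = true) := by
        simp only [beq_iff_eq]
        exact fun h' => h h'.symm
      rw [if_neg h1, if_neg h2]; omega

theorem pv_count_pvFigs (v : String) :
    pvFigs.count v = if v ∈ pvFigs then 1 else 0 := by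
  by_cases h : v ∈ pvFigs
  · rw [if_pos h]
    exact List.count_eq_one_of_mem (by decide) h
  · rw [if_neg h]
    exact List.count_eq_zero_of_not_mem h

-- the match-count never exceeds the non-blank count
theorem pv_sum_le (vs : List String) :
    (pvFigs.map (vs.count ·)).sum ≤ (vs.filter (fun v => v != " ")).length := by
  induction vs with
  | nil => simp
  | cons v vs ih =>
    rw [pv_sum_counts_cons, pv_count_pvFigs, List.filter_cons]
    by_cases h : v = " "
    · have : (" " : String) ∉ pvFigs := by decide
      simp [h, this]; simpa using ih
    · have hb : (v != " ") = true := by simpa using h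
      simp only [hb, if_true, List.length_cons]
      split_ifs <;> omega

-- the counts agree exactly when every non-blank value is a valid figure
theorem pv_key (vs : List String) :
    ((pvFigs.map (vs.count ·)).sum = (vs.filter (fun v => v != " ")).length)
      ↔ (∀ v ∈ vs, v ≠ " " → v ∈ pvFigs) := by
  induction vs with
  | nil => simp
  | cons v vs ih =>
    rw [pv_sum_counts_cons, pv_count_pvFigs, List.filter_cons]
    by_cases h : v = " "
    · have hnb : (" " : String) ∉ pvFigs := by decide
      subst h
      simp [hnb, ih]
    · have hb : (v != " ") = true := by simpa using h
      by_cases hm : v ∈ pvFigs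
      · simp only [hm, if_pos, hb, List.length_cons]
        constructor
        · intro he
          have : (pvFigs.map (vs.count ·)).sum = (vs.filter (fun v => v != " ")).length := by omega
          intro x hx
          rcases List.mem_cons.mp hx with rfl | hx'
          · intro _; exact hm
          · exact (ih.mp this) x hx'
        · intro hall
          have : (pvFigs.map (vs.count ·)).sum = (vs.filter (fun v => v != " ")).length :=
            ih.mpr (fun x hx hxs => hall x (List.mem_cons_of_mem _ hx) hxs)
          omega
      · simp only [hm, if_neg, hb, if_true, List.length_cons, not_false_eq_true]
        have hle := pv_sum_le vs
        constructor
        · intro he; omega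
        · intro hall
          exact absurd (hall v (List.mem_cons_self) h) hm

theorem pv_A_iff (cb : List (String × String)) :
    available_figure_list_check cb = true ↔
      (∀ v ∈ cb.map (·.2), v ≠ " " → v ∈ pvFigs) := by
  unfold available_figure_list_check
  have hen : PySem.List.enumerate pvFigs =
      [(0, "wqueen"), (1, "wking"), (2, "wpaw"), (3, "wbishop"), (4, "wknight"), (5, "wrock"),
       (6, "bqueen"), (7, "bking"), (8, "bpaw"), (9, "bbishop"), (10, "bknight"), (11, "brock")] := by
    decide
  show (if _ then true else false) = true ↔ _
  set vs := cb.map (·.2) with hvs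
  have hA : (PySem.List.enumerate pvFigs).foldl
      (fun acc p => vs.foldl (fun a v => if v == p.2 then a + 1 else a) acc) (0 : Int)
      = ((pvFigs.map (vs.count ·)).sum : Int) := by
    rw [hen]
    simp only [List.foldl_cons, List.foldl_nil, pv_count_fold]
    simp [pvFigs]
    ring
  rw [show ([("wqueen" : String), "wking", "wpaw", "wbishop", "wknight", "wrock",
       "bqueen", "bking", "bpaw", "bbishop", "bknight", "brock"]) = pvFigs from rfl, hA,
      pv_len_fold]
  rw [← pv_key vs]
  constructor
  · intro hif
    by_contra hne
    have h : (((pvFigs.map (vs.count ·)).sum : Int) == 0 + ((vs.filter (fun v => v != " ")).length : Int)) = false := by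
      rw [beq_eq_false_iff_ne]
      intro hc; apply hne; omega
    rw [h] at hif
    simp at hif
  · intro he
    have h : (((pvFigs.map (vs.count ·)).sum : Int) == 0 + ((vs.filter (fun v => v != " ")).length : Int)) = true := by
      rw [beq_iff_eq]; omega
    rw [h]
    simp

theorem pv_B_iff (cb : List (String × String)) :
    available_figure_list_check_alt cb = true ↔
      (∀ v ∈ cb.map (·.2), v ≠ " " → v ∈ pvFigs) := by
  unfold available_figure_list_check_alt
  rw [PySem.Set.issubset_iff]
  constructor
  · intro h v hv hne
    have hmem : v ∈ PySem.Set.diff (PySem.Set.ofList (cb.map (·.2))) (PySem.Set.ofList [" "]) := by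
      rw [PySem.Set.mem_diff]
      exact ⟨(PySem.Set.mem_ofList _ _).mpr hv, by simpa [PySem.Set.mem_ofList] using hne⟩
    have := h v hmem
    simpa [pvValidFigures, PySem.Set.mem_ofList, pvFigs] using this
  · intro h v hv
    rw [PySem.Set.mem_diff, PySem.Set.mem_ofList, PySem.Set.mem_ofList] at hv
    have := h v hv.1 (by simpa using hv.2)
    simpa [pvValidFigures, PySem.Set.mem_ofList, pvFigs] using this

-- ===== VERDICT (by name: the statement is the Claim_ definition above) =====
theorem available_figure_list_check_spec : Claim_equal_available_figure_list_check := by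
  intro cb _
  unfold Spec_available_figure_list_check
  rw [Bool.eq_iff_iff, pv_A_iff, pv_B_iff]
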